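-- pv_equiv track=rewrite | github.com/thehalleyyoung/deppy | src/deppy/hybrid/pipeline/stages.py | _join_trust
-- ===== SOURCE A (Python) =====
-- _TRUST_RANK = {
--     "lean_verified": 5,
--     "z3_proven": 4,
--     "llm_judged": 3,
--     "runtime_checked": 2,
--     "untrusted": 1,
--     "contradicted": 0,
-- }
--
-- def _join_trust(a: str, b: str) -> str:
--     """Return the lower of two trust levels (conservative join)."""
--     ra = _TRUST_RANK.get(a, 1)
--     rb = _TRUST_RANK.get(b, 1)
--     target = min(ra, rb)
--     for name, rank in _TRUST_RANK.items():
--         if rank == target: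
--             return name
--     return "untrusted"
-- ===== SOURCE B (Python) =====
-- _TRUST_RANK = {
--     "lean_verified": 5,
--     "z3_proven": 4,
--     "llm_judged": 3,
--     "runtime_checked": 2,
--     "untrusted": 1,
--     "contradicted": 0,
-- }
--
-- def _join_trust(a: str, b: str) -> str:
--     """Return the lower of two trust levels (conservative join)."""
--     lower = a if _TRUST_RANK.get(a, 1) <= _TRUST_RANK.get(b, 1) else b
--     return lower if lower in _TRUST_RANK else "untrusted"
-- ===== Notes on version B (the rewrite author's own statement) =====
-- stated objective: simpler
-- what changed: B selects the lower-ranked input string directly and canonicalizes unknown names to 'untrusted', dropping A's scan over the dict items that recovers a name from its rank.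
import Mathlib
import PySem

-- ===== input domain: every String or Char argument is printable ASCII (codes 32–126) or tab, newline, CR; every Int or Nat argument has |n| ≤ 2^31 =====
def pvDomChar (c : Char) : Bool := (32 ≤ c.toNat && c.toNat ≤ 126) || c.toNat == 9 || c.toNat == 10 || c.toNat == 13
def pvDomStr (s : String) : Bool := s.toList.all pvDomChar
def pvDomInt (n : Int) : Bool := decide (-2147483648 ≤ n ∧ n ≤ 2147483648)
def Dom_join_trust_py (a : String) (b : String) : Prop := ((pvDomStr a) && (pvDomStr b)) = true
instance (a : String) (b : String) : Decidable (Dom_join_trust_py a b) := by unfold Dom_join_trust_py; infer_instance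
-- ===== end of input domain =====

-- B picks the lower-ranked input string directly and canonicalizes unknown names to "untrusted",
-- replacing A's rank-to-name scan over the dict items; objective: simpler (no speed claim).

-- ===== PORT A =====
-- the module constant _TRUST_RANK (literal dict, distinct keys, insertion order)
def trustTable : PySem.Dict String Int :=
  PySem.Dict.mk [("lean_verified", 5), ("z3_proven", 4), ("llm_judged", 3),
                 ("runtime_checked", 2), ("untrusted", 1), ("contradicted", 0)]

-- the 'for name, rank in _TRUST_RANK.items(): if rank == target: return name' loop (else-fallthrough returns "untrusted")
def trustScan : List (String × Int) → Int → String
  | [], _ => "untrusted"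
  | (name, rank) :: rest, target => if rank == target then name else trustScan rest target

def join_trust_py (a : String) (b : String) : String :=
  let ra := trustTable.getD a 1
  let rb := trustTable.getD b 1
  let target := min ra rb
  trustScan trustTable.items target

-- ===== PORT B =====
def join_trust_py_alt (a : String) (b : String) : String :=
  let lower := if trustTable.getD a 1 ≤ trustTable.getD b 1 then a else b
  if trustTable.contains lower then lower else "untrusted"

-- ===== PRECONDITION & SPEC =====
def Spec_join_trust_py (a : String) (b : String) (out : String) : Prop := out = join_trust_py_alt a b
instance (a : String) (b : String) (out : String) : Decidable (Spec_join_trust_py a b out) := by unfold Spec_join_trust_py; infer_instance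

-- ===== CLAIM (what is proved, stated in full; the proofs are below) =====
def Claim_equal_join_trust_py : Prop := ∀ (a : String) (b : String), Dom_join_trust_py a b → Spec_join_trust_py a b (join_trust_py a b)

-- ===== LEMMAS AND PROOFS =====
-- ranks are distinct, so the scan recovers exactly the key it started from
theorem trust_scan_key (s : String) (h : trustTable.contains s = true) :
    trustScan trustTable.items (trustTable.getD s 1) = s := by
  simp [trustTable] at h
  rcases h with rfl|rfl|rfl|rfl|rfl|rfl <;> decide

theorem trust_scan_one : trustScan trustTable.items 1 = "untrusted" := by decide

theorem join_trust_main (a b : String) : join_trust_py a b = join_trust_py_alt a b := by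
  simp only [join_trust_py, join_trust_py_alt]
  by_cases hle : trustTable.getD a 1 ≤ trustTable.getD b 1
  · rw [if_pos hle, min_eq_left hle]
    by_cases hc : trustTable.contains a = true
    · rw [if_pos hc, trust_scan_key a hc]
    · rw [if_neg hc, PySem.Dict.getD_of_not_contains trustTable 1 (by simpa using hc), trust_scan_one]
  · rw [if_neg hle, min_eq_right (le_of_not_ge hle)]
    by_cases hc : trustTable.contains b = true
    · rw [if_pos hc, trust_scan_key b hc]
    · rw [if_neg hc, PySem.Dict.getD_of_not_contains trustTable 1 (by simpa using hc), trust_scan_one]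

-- ===== VERDICT (by name: the statement is the Claim_ definition above) =====
theorem join_trust_py_spec : Claim_equal_join_trust_py := by
  intro a b _
  exact join_trust_main a b
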